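-- pv_equiv track=rewrite | github.com/babywyrm/sysadmin | pyth3/blue_for_birth_.py | welshcount
-- ===== SOURCE A (Python) =====
-- from collections import defaultdict
--
-- digraphs=['ch','dd','ff','ng','ll','ph','rh','th']
--
-- breakchars=['|']
--
-- def welshcount(word):
--     word = word.lower()
--     index = 0
--     counts = defaultdict(int)  # keys start at 0 if not already present
--     while index < len(word):
--         if word[index:index+2] in digraphs:
--             counts[word[index:index+2]] += 1
--             index += 1
--         elif word[index] in breakchars:
--             pass  # in case you want to do something here later
--         else:  # plain old letter
--             counts[word[index]] += 1
--
--         index += 1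
--
--     return sum(counts.values())
-- ===== SOURCE B (Python) =====
-- import re
--
-- _WELSH_TOKEN = re.compile(r'ch|dd|ff|ng|ll|ph|rh|th|[^|]')
--
-- def welshcount(word):
--     # Digraph alternatives come first, so the regex scan consumes a digraph
--     # greedily as one token; '|' matches nothing and is skipped.
--     return len(_WELSH_TOKEN.findall(word.lower()))
-- ===== Notes on version B (the rewrite author's own statement) =====
-- stated objective: idiomatic
-- what changed: Replaces the explicit index loop with a per-character dict of counts (summed at the end) by a single regex findall whose alternation (digraphs first, then any non-break char) tokenises the word, returning the number of matches.
import Mathlib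
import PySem

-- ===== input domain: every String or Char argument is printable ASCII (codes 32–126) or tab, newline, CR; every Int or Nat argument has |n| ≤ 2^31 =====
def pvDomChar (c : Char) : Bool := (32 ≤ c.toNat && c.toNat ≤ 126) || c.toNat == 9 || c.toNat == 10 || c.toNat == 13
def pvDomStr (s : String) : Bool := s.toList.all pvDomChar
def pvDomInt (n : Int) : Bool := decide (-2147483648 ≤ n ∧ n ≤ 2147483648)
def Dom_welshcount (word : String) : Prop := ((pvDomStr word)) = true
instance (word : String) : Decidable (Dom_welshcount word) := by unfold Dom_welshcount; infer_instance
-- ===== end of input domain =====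

-- B replaces A's index loop + per-key dict of counts by a single regex-style
-- greedy tokenisation (digraphs first, then any non-'|' char), counting matches. (idiomatic)

-- digraphs = ['ch','dd','ff','ng','ll','ph','rh','th'] (strings as char lists)
def pvDigraphs : List (List Char) :=
  [['c','h'], ['d','d'], ['f','f'], ['n','g'], ['l','l'], ['p','h'], ['r','h'], ['t','h']]

-- breakchars = ['|']
def pvBreakchars : List Char := ['|']

-- ===== PORT A =====
-- while loop of A: index scan; word[index:index+2] via PySem slice; counts is a
-- defaultdict(int), ported as a Dict with modify _ 0 (· + 1); returns sum(counts.values()).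
def welshcountGo (w : List Char) (index : Nat) (counts : PySem.Dict (List Char) Int) : Int :=
  if h : index < w.length then
    let two := PySem.List.slice w (some (index : Int)) (some ((index : Int) + 2))
    if two ∈ pvDigraphs then
      -- counts[word[index:index+2]] += 1; index += 1 (then the shared index += 1)
      welshcountGo w (index + 1 + 1) (counts.modify two 0 (· + 1))
    else if w[index] ∈ pvBreakchars then
      welshcountGo w (index + 1) counts
    else
      welshcountGo w (index + 1) (counts.modify [w[index]] 0 (· + 1))
  else (counts.values).sum
  termination_by w.length - index

def welshcount (word : String) : Int :=
  welshcountGo (PySem.Str.lower word).toList 0 PySem.Dict.empty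

-- ===== PORT B =====
-- re.findall(r'ch|dd|ff|ng|ll|ph|rh|th|[^|]', word.lower()): at each position try
-- the digraph alternatives in order, else the single non-'|' char; count the matches.
def welshMatches : List Char → Int
  | c1 :: c2 :: rest =>
    if [c1, c2] ∈ pvDigraphs then 1 + welshMatches rest
    else if c1 = '|' then welshMatches (c2 :: rest)
    else 1 + welshMatches (c2 :: rest)
  | [c] => if c = '|' then 0 else 1
  | [] => 0

def welshcount_alt (word : String) : Int :=
  welshMatches (PySem.Str.lower word).toList

-- ===== PRECONDITION & SPEC =====
def Spec_welshcount (word : String) (out : Int) : Prop := out = welshcount_alt word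
instance (word : String) (out : Int) : Decidable (Spec_welshcount word out) := by unfold Spec_welshcount; infer_instance

-- ===== CLAIM (what is proved, stated in full; the proofs are below) =====
def Claim_equal_welshcount : Prop := ∀ (word : String), Dom_welshcount word → Spec_welshcount word (welshcount word)

-- ===== LEMMAS AND PROOFS =====

-- replacing the unique item with key k by (k, v) changes the values sum by v - w
lemma sum_snd_replace (l : List (List Char × Int)) (k : List Char) (v w : Int)
    (hnd : (l.map Prod.fst).Nodup) (hmem : (k, w) ∈ l) :
    ((l.map (fun p => if p.1 = k then (k, v) else p)).map Prod.snd).sum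
      = (l.map Prod.snd).sum - w + v := by
  induction l with
  | nil => cases hmem
  | cons a t ih =>
    simp only [List.map_cons, List.nodup_cons] at hnd
    rw [List.mem_cons] at hmem
    rcases hmem with h | h
    · subst h
      have htail : ∀ p ∈ t, (fun p : List Char × Int => if p.1 = k then (k, v) else p) p = p := by
        intro p hp
        have : p.1 ≠ k := fun hk => hnd.1 (List.mem_map.mpr ⟨p, hp, hk⟩)
        simp [this]
      simp only [List.map_cons, List.map_congr_left htail]
      simp; ring
    · have hak : a.1 ≠ k := fun hk => hnd.1 (List.mem_map.mpr ⟨(k, w), h, hk.symm ▸ rfl⟩)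
      have hih := ih hnd.2 h
      simp only [List.map_cons, List.sum_cons, List.map_map] at hih ⊢
      rw [if_neg hak, hih]
      ring

-- counts[k] += 1 on a defaultdict(int) raises the values sum by exactly 1
lemma sum_values_modify (d : PySem.Dict (List Char) Int) (k : List Char)
    (hnd : d.keys.Nodup) :
    ((d.modify k 0 (· + 1)).values).sum = d.values.sum + 1 := by
  show ((d.insert k (d.getD k 0 + 1)).values).sum = d.values.sum + 1
  by_cases hc : d.contains k = true
  · obtain ⟨w, hw⟩ : ∃ w, d.get? k = some w := by
      have := PySem.Dict.contains_eq_isSome_get? (d := d) (k := k)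
      rw [hc] at this
      exact Option.isSome_iff_exists.mp this.symm
    have hgd : d.getD k 0 = w := PySem.Dict.getD_of_get?_eq_some d 0 hw
    have hmem : (k, w) ∈ d.items := PySem.Dict.mem_items_of_get?_eq_some d hw
    have hitems := PySem.Dict.items_insert_of_contains d (d.getD k 0 + 1) hc
    have hv : ((d.insert k (d.getD k 0 + 1)).values)
        = (d.items.map (fun p => if p.1 = k then (k, d.getD k 0 + 1) else p)).map Prod.snd := by
      simp [PySem.Dict.values, hitems, beq_iff_eq]
    rw [hv, sum_snd_replace d.items k (d.getD k 0 + 1) w hnd hmem, hgd]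
    show (d.items.map Prod.snd).sum - w + (w + 1) = (d.items.map Prod.snd).sum + 1
    ring
  · have hc' : d.contains k = false := by simpa using hc
    have hgd : d.getD k 0 = 0 := PySem.Dict.getD_of_not_contains d 0 hc'
    have hitems := PySem.Dict.items_insert_of_not_contains d (d.getD k 0 + 1) hc'
    have hv : ((d.insert k (d.getD k 0 + 1)).values) = d.values ++ [d.getD k 0 + 1] := by
      simp [PySem.Dict.values, hitems]
    rw [hv, hgd]
    simp

-- B's matcher on a list starting with a non-digraph prefix
lemma welshMatches_cons (c : Char) (rest : List Char)
    (hnd : (c :: rest).take 2 ∉ pvDigraphs) :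
    welshMatches (c :: rest) = if c = '|' then welshMatches rest else 1 + welshMatches rest := by
  cases rest with
  | nil => rfl
  | cons c2 t =>
    simp only [List.take_succ_cons, List.take_zero] at hnd
    have hnd' : ¬ ([c, c2] ∈ pvDigraphs) := by simpa using hnd
    simp only [welshMatches, if_neg hnd']

-- loop invariant: from any state, A's loop returns current sum + B's count of the rest
lemma welshcountGo_eq (n : Nat) : ∀ (w : List Char) (index : Nat)
    (counts : PySem.Dict (List Char) Int), w.length - index = n → counts.keys.Nodup →
    welshcountGo w index counts = counts.values.sum + welshMatches (w.drop index) := by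
  induction n using Nat.strong_induction_on with
  | _ n ih =>
    intro w index counts hn hnd
    rw [welshcountGo]
    by_cases h : index < w.length
    · rw [dif_pos h]
      have hslice : PySem.List.slice w (some (index : Int)) (some ((index : Int) + 2))
          = (w.drop index).take 2 := by
        have := PySem.List.slice_natCast_add (xs := w) (j := index) (n := 2)
        simpa using this
      have hdrop : w.drop index = w[index] :: w.drop (index + 1) :=
        List.drop_eq_getElem_cons h
      by_cases hdig : (w.drop index).take 2 ∈ pvDigraphs
      · rw [if_pos (hslice ▸ hdig)]
        -- a digraph has length 2, so there are at least two chars left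
        have hlen2 : index + 1 < w.length := by
          by_contra hle
          have : w.drop (index + 1) = [] := List.drop_eq_nil_of_le (by omega)
          rw [hdrop, this] at hdig
          simp [pvDigraphs] at hdig
        have hdrop2 : w.drop (index + 1) = w[index + 1] :: w.drop (index + 2) :=
          List.drop_eq_getElem_cons hlen2
        have htake : (w.drop index).take 2 = [w[index], w[index + 1]] := by
          rw [hdrop, hdrop2]; rfl
        have hnd' : ((counts.modify (PySem.List.slice w (some (index : Int))
            (some ((index : Int) + 2))) 0 (· + 1)).keys).Nodup :=
          PySem.Dict.nodup_keys_insert _ _ _ hnd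
        rw [ih (w.length - (index + 1 + 1)) (by omega) w (index + 1 + 1) _ rfl hnd']
        rw [sum_values_modify _ _ hnd]
        rw [hdrop, hdrop2]
        rw [htake] at hdig
        simp only [welshMatches, if_pos hdig]
        have : index + 1 + 1 = index + 2 := by omega
        rw [this]
        ring
      · rw [if_neg (hslice ▸ hdig)]
        have hrec := ih (w.length - (index + 1)) (by omega) w (index + 1)
        rw [hdrop]
        rw [hdrop] at hdig
        rw [welshMatches_cons _ _ hdig]
        by_cases hbar : w[index] ∈ pvBreakchars
        · have hbar' : w[index] = '|' := by simpa [pvBreakchars] using hbar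
          rw [if_pos hbar, if_pos hbar', hrec counts rfl hnd]
        · have hbar' : ¬ (w[index] = '|') := by simpa [pvBreakchars] using hbar
          have hnd' : ((counts.modify [w[index]] 0 (· + 1)).keys).Nodup :=
            PySem.Dict.nodup_keys_insert _ _ _ hnd
          rw [if_neg hbar, if_neg hbar', hrec _ rfl hnd', sum_values_modify _ _ hnd]
          ring
    · rw [dif_neg h]
      have : w.drop index = [] := List.drop_eq_nil_of_le (by omega)
      rw [this]
      simp [welshMatches]

theorem welsh_main (w : List Char) :
    welshcountGo w 0 PySem.Dict.empty = welshMatches w := by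
  have := welshcountGo_eq (w.length) w 0 PySem.Dict.empty (by simp) (by simp [PySem.Dict.keys, PySem.Dict.empty])
  simpa [PySem.Dict.empty, PySem.Dict.values] using this

-- ===== VERDICT (by name: the statement is the Claim_ definition above) =====
theorem welshcount_spec : Claim_equal_welshcount := by
  intro word _
  show welshcount word = welshcount_alt word
  unfold welshcount welshcount_alt
  exact welsh_main _
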